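-- pv_equiv track=rewrite | github.com/Burhanudin02/skripsi | surrol/tasks/my_needle_pick_test.py | analyze_grip_episodes
-- ===== SOURCE A (Python) =====
-- def analyze_grip_episodes(contact_series):
--     """Return list of contiguous grip episode lengths (in steps)."""
--     durations = []
--     current = 0
--     for v in contact_series:
--         if v:
--             current += 1
--         else:
--             if current > 0:
--                 durations.append(current)
--                 current = 0
--     if current > 0:
--         durations.append(current)
--     return durations
-- ===== SOURCE B (Python) =====
-- from itertools import groupby
--
-- def analyze_grip_episodes(contact_series):
--     """Return list of contiguous grip episode lengths (in steps)."""
--     durations = []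
--     for key, grp in groupby(contact_series, key=bool):
--         if key:
--             durations.append(sum(1 for _ in grp))
--     return durations
-- ===== Notes on version B (the rewrite author's own statement) =====
-- stated objective: idiomatic
-- what changed: Replaced the explicit current-counter state machine with itertools.groupby over bool(v): truthy groups are consumed and their lengths appended, removing the run-in-progress counter and the trailing flush.
import Mathlib
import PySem

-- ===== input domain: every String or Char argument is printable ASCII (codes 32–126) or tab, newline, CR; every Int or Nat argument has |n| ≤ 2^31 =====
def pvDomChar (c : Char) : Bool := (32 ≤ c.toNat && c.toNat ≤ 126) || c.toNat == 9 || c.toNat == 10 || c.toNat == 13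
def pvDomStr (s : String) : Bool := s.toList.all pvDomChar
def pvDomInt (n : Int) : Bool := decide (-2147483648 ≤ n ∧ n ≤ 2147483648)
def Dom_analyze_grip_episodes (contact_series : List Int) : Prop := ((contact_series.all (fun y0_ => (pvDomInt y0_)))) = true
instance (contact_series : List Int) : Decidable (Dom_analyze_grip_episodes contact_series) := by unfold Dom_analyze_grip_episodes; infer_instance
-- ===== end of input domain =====

-- B replaces A's explicit current-counter state machine by a groupby-style traversal
-- (split off each maximal run of equal truthiness, keep lengths of truthy runs): idiomatic, same O(n) cost.


-- ===== PORT A =====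
-- A's for-loop over (durations, current), with the post-loop flush in the base case.
def goA (durations : List Int) (current : Int) : List Int → List Int
  | [] => if current > 0 then durations ++ [current] else durations
  | v :: rest =>
    if v ≠ 0 then goA durations (current + 1) rest
    else if current > 0 then goA (durations ++ [current]) 0 rest
    else goA durations current rest

def analyze_grip_episodes (contact_series : List Int) : List Int :=
  goA [] 0 contact_series

-- ===== PORT B =====
-- B's groupby(key=bool): split off the first maximal run of the head's truthiness,
-- append its length when the key is truthy, recurse on the remainder.
def analyze_grip_episodes_alt (contact_series : List Int) : List Int :=
  match contact_series with
  | [] => []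
  | v :: rest =>
    if v ≠ 0 then
      (1 + ((rest.takeWhile (fun w => w ≠ 0)).length : Int))
        :: analyze_grip_episodes_alt (rest.dropWhile (fun w => w ≠ 0))
    else
      analyze_grip_episodes_alt (rest.dropWhile (fun w => w = 0))
termination_by contact_series.length
decreasing_by
  · exact Nat.lt_succ_of_le (List.length_dropWhile_le _ _)
  · exact Nat.lt_succ_of_le (List.length_dropWhile_le _ _)

-- ===== PRECONDITION & SPEC =====
def Spec_analyze_grip_episodes (contact_series : List Int) (out : List Int) : Prop := out = analyze_grip_episodes_alt contact_series
instance (contact_series : List Int) (out : List Int) : Decidable (Spec_analyze_grip_episodes contact_series out) := by unfold Spec_analyze_grip_episodes; infer_instance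

-- ===== CLAIM (what is proved, stated in full; the proofs are below) =====
def Claim_equal_analyze_grip_episodes : Prop := ∀ (contact_series : List Int), Dom_analyze_grip_episodes contact_series → Spec_analyze_grip_episodes contact_series (analyze_grip_episodes contact_series)

-- ===== LEMMAS AND PROOFS =====

theorem alt_nil : analyze_grip_episodes_alt [] = [] := by
  rw [analyze_grip_episodes_alt]

theorem alt_cons_pos (v : Int) (rest : List Int) (hv : v ≠ 0) :
    analyze_grip_episodes_alt (v :: rest) =
      (1 + ((rest.takeWhile (fun w => w ≠ 0)).length : Int))
        :: analyze_grip_episodes_alt (rest.dropWhile (fun w => w ≠ 0)) := by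
  rw [analyze_grip_episodes_alt]
  simp [hv]

theorem alt_cons_zero (rest : List Int) :
    analyze_grip_episodes_alt ((0 : Int) :: rest) =
      analyze_grip_episodes_alt (rest.dropWhile (fun w => w = 0)) := by
  rw [analyze_grip_episodes_alt]
  simp

-- Absorb a run of truthy elements into the counter.
theorem goA_truthy (t : List Int) (ht : ∀ x ∈ t, x ≠ 0) :
    ∀ (rest d : List Int) (c : Int), goA d c (t ++ rest) = goA d (c + t.length) rest := by
  induction t with
  | nil => intro rest d c; simp
  | cons x xs ih =>
    intro rest d c
    have hx : x ≠ 0 := ht x (by simp)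
    simp only [List.cons_append, goA, if_pos hx]
    rw [ih (fun y hy => ht y (by simp [hy])) rest d (c + 1)]
    congr 1
    simp only [List.length_cons]
    push_cast
    ring

-- A run of falsy elements is skipped when the counter is zero.
theorem goA_falsy (t : List Int) (ht : ∀ x ∈ t, x = 0) :
    ∀ (rest d : List Int), goA d 0 (t ++ rest) = goA d 0 rest := by
  induction t with
  | nil => intro rest d; simp
  | cons x xs ih =>
    intro rest d
    have hx : x = 0 := ht x (by simp)
    simp only [List.cons_append, goA, hx, ne_eq, not_true_eq_false, if_false, lt_irrefl]
    exact ih (fun y hy => ht y (by simp [hy])) rest d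

-- With a positive counter and a falsy head, the counter is flushed; flushing first is the same.
theorem goA_flush (d : List Int) (c : Int) (hc : 0 < c) (rr : List Int) (u : Int) (hu : u = 0) :
    goA d c (u :: rr) = goA (d ++ [c]) 0 (u :: rr) := by
  subst hu
  simp [goA, hc]

theorem goA_eq_alt : ∀ (cs d : List Int), goA d 0 cs = d ++ analyze_grip_episodes_alt cs := by
  intro cs
  induction cs using analyze_grip_episodes_alt.induct with
  | case1 => intro d; simp [goA, alt_nil]
  | case2 v rest hv ih =>
    intro d
    have htk : ∀ x ∈ rest.takeWhile (fun w : Int => w ≠ 0), x ≠ 0 := by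
      intro x hx
      simpa using List.mem_takeWhile_imp hx
    have hc : (0 : Int) < 1 + ((rest.takeWhile (fun w : Int => w ≠ 0)).length : Int) := by
      positivity
    have step1 : goA d 0 (v :: rest) =
        goA d (1 + ((rest.takeWhile (fun w : Int => w ≠ 0)).length : Int))
          (rest.dropWhile (fun w : Int => w ≠ 0)) := by
      have h0 : goA d 0 (v :: rest) = goA d (0 + 1) rest := by
        simp only [goA, if_pos hv]
      rw [h0]
      conv_lhs => rw [← List.takeWhile_append_dropWhile
        (p := fun w : Int => decide (w ≠ 0)) (l := rest)]
      rw [goA_truthy _ htk]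
      norm_num
    obtain ⟨c, hC, hc⟩ :
        ∃ c : Int, (1 + ((rest.takeWhile (fun w : Int => w ≠ 0)).length : Int)) = c ∧ 0 < c :=
      ⟨_, rfl, hc⟩
    rw [hC] at step1
    rw [step1, alt_cons_pos v rest hv, hC]
    rcases hdr : rest.dropWhile (fun w : Int => w ≠ 0) with _ | ⟨u, rr⟩
    · simp only [goA]
      rw [if_pos hc]
      simp [alt_nil]
    · have hu : u = 0 := by
        have h := List.head?_dropWhile_not (fun w : Int => decide (w ≠ 0)) rest
        rw [hdr] at h
        simpa using h
      rw [hdr] at ih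
      rw [goA_flush d c hc rr u hu, ih (d ++ [c])]
      simp
  | case3 v rest hv ih =>
    intro d
    have hv0 : v = 0 := by simpa using hv
    subst hv0
    have htk : ∀ x ∈ rest.takeWhile (fun w : Int => w = 0), x = 0 := by
      intro x hx
      simpa using List.mem_takeWhile_imp hx
    have step1 : goA d 0 ((0 : Int) :: rest) = goA d 0 rest := by
      simp [goA]
    rw [step1]
    conv_lhs => rw [← List.takeWhile_append_dropWhile
      (p := fun w : Int => decide (w = 0)) (l := rest)]
    rw [goA_falsy _ htk, ih, alt_cons_zero]

-- ===== VERDICT (by name: the statement is the Claim_ definition above) =====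
theorem analyze_grip_episodes_spec : Claim_equal_analyze_grip_episodes := by
  intro cs _
  unfold Spec_analyze_grip_episodes analyze_grip_episodes
  simpa using goA_eq_alt cs []
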